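-- pv_equiv track=rewrite | github.com/natpicone/import_manifest | import_manifest.py | process_compfile_line
-- ===== SOURCE A (Python) =====
-- def process_compfile_line(line):
--     version = ""
--     package = ""
--     splitline = line.split("-")
--     for segment in splitline:
--         if segment[0].isdigit():
--             if version != "":
--                 version += "."
--             version += segment.strip()
--         else:
--             if package != "":
--                 package += "-"
--             package += segment.strip()
--     return(package, version)
-- ===== SOURCE B (Python) =====
-- def process_compfile_line(line):
--     i = line.find("-")
--     if i == -1:
--         seg = line.strip()
--         if line[0].isdigit():
--             return ("", seg)
--         return (seg, "")
--     head = line[:i]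
--     package, version = process_compfile_line(line[i + 1:])
--     seg = head.strip()
--     if head[0].isdigit():
--         return (package, seg if version == "" else seg + "." + version)
--     return (seg if package == "" else seg + "-" + package, version)
-- ===== Notes on version B (the rewrite author's own statement) =====
-- stated objective: alternative
-- what changed: Replaces A's iterative split-then-accumulate loop by a recursive divide-and-conquer: find the first '-', recurse on the remainder, and combine the head segment with the recursive result back-to-front (no split call, no accumulator state).
-- outside the precondition, e.g. on process_compfile_line('  -x'): A returns ('x', ''), B returns ('-x', ''); on process_compfile_line('-'): A raises IndexError, B raises IndexError
import Mathlib
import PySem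

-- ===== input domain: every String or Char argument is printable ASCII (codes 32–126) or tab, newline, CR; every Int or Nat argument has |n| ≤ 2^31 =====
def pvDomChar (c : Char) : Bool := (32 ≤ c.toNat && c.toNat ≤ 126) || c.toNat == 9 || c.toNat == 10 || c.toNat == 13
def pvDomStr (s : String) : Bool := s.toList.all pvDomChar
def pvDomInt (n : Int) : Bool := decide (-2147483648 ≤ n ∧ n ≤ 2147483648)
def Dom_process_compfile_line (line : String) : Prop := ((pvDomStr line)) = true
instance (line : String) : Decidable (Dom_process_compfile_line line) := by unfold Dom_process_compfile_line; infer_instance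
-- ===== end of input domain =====

-- B replaces A's iterative split-then-accumulate loop by a recursion on the first '-' that combines results back-to-front (alternative decomposition, same observable result).

-- ===== PORT A =====
def process_compfile_line (line : String) : String × String :=
  let splitline := PySem.Chars.splitOn line.toList ['-']
  let pv := splitline.foldl
    (fun (acc : List Char × List Char) segment =>
      match PySem.List.pyGet? segment 0 with
      | none => acc        -- segment[0] raises IndexError in Python; such lines are excluded by Pre_
      | some c =>
        if PySem.Chars.isdigit c then
          (acc.1, (if acc.2 ≠ [] then acc.2 ++ ['.'] else acc.2) ++ PySem.Chars.strip segment)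
        else
          ((if acc.1 ≠ [] then acc.1 ++ ['-'] else acc.1) ++ PySem.Chars.strip segment, acc.2))
    ([], [])
  (String.ofList pv.1, String.ofList pv.2)

-- ===== PORT B =====
-- segment[0].isdigit(); none = IndexError in Python, excluded by Pre_
def pvHeadIsDigit (segment : List Char) : Bool :=
  match PySem.List.pyGet? segment 0 with
  | none => false
  | some c => PySem.Chars.isdigit c

-- Source B's recursion: line.find("-") ported as PySem.List.index? (none = -1); the slices
-- line[:i] / line[i+1:] with 0 ≤ i < len are List.take i / List.drop (i+1), exact here.
def pvAltGo (cs : List Char) : List Char × List Char :=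
  match hidx : PySem.List.index? cs '-' with
  | none =>
    let seg := PySem.Chars.strip cs
    if pvHeadIsDigit cs then ([], seg) else (seg, [])
  | some i =>
    let head := cs.take i
    let pv := pvAltGo (cs.drop (i + 1))
    let seg := PySem.Chars.strip head
    if pvHeadIsDigit head then
      (pv.1, if pv.2 = [] then seg else seg ++ ['.'] ++ pv.2)
    else
      ((if pv.1 = [] then seg else seg ++ ['-'] ++ pv.1), pv.2)
termination_by cs.length
decreasing_by
  have hne : cs ≠ [] := by
    intro h; subst h
    simp [PySem.List.index?_eq_idxOf?] at hidx
  have : 0 < cs.length := List.length_pos_iff.mpr hne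
  simp only [List.length_drop]
  omega

def process_compfile_line_alt (line : String) : String × String :=
  let pv := pvAltGo line.toList
  (String.ofList pv.1, String.ofList pv.2)

-- ===== PRECONDITION & SPEC =====
-- Pre_ excludes lines with an empty segment between hyphens (A raises IndexError at segment[0]) and lines
-- with a whitespace-only segment, on which A's skip-the-separator-while-the-accumulator-is-empty logic and
-- B's plain concatenation place separators differently — an accidental corner of either implementation.
def Pre_process_compfile_line (line : String) : Prop :=
  ∀ s ∈ PySem.Chars.splitOn line.toList ['-'], PySem.Chars.strip s ≠ []
instance (line : String) : Decidable (Pre_process_compfile_line line) := by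
  unfold Pre_process_compfile_line; infer_instance

def pvWitness_process_compfile_line : String := "libfoo-1.2"

def Spec_process_compfile_line (line : String) (out : String × String) : Prop := out = process_compfile_line_alt line
instance (line : String) (out : String × String) : Decidable (Spec_process_compfile_line line out) := by unfold Spec_process_compfile_line; infer_instance

-- ===== CLAIM (what is proved, stated in full; the proofs are below) =====
def Claim_equal_process_compfile_line : Prop := ∀ (line : String), Dom_process_compfile_line line → Pre_process_compfile_line line → Spec_process_compfile_line line (process_compfile_line line)

-- ===== LEMMAS AND PROOFS =====

-- proof-only structural model of line.split('-')
def pvMySplit : List Char → List (List Char)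
  | [] => [[]]
  | c :: rest =>
    if c = '-' then [] :: pvMySplit rest
    else
      match pvMySplit rest with
      | [] => [[c]]
      | p :: ps => (c :: p) :: ps

lemma pvMySplit_ne_nil (cs : List Char) : pvMySplit cs ≠ [] := by
  induction cs with
  | nil => simp [pvMySplit]
  | cons c rest ih =>
    simp only [pvMySplit]
    split
    · simp
    · split
      · simp
      · simp

def pvConsHead (p : List Char) : List (List Char) → List (List Char)
  | [] => [p]
  | q :: qs => (p ++ q) :: qs

lemma pv_go_spec (fuel : Nat) : ∀ (l cur acc : _), l.length ≤ fuel →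
    PySem.Chars.splitOn.go ['-'] fuel l cur acc
      = acc.reverse ++ pvConsHead cur.reverse (pvMySplit l) := by
  induction fuel with
  | zero =>
    intro l cur acc hl
    have : l = [] := by cases l <;> simp_all
    subst this
    simp [PySem.Chars.splitOn.go, pvMySplit, pvConsHead]
  | succ fuel ih =>
    intro l cur acc hl
    cases l with
    | nil => simp [PySem.Chars.splitOn.go, pvMySplit, pvConsHead]
    | cons c rest =>
      simp only [PySem.Chars.splitOn.go]
      by_cases hc : c = '-'
      · subst hc
        have hpre : List.isPrefixOf ['-'] ('-' :: rest) = true := by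
          simp [List.isPrefixOf]
        simp only [hpre, if_true, List.length_cons] at *
        rw [show List.drop (([] : List Char).length + 1) ('-' :: rest) = rest from rfl]
        rw [ih _ _ _ (by omega)]
        have : pvMySplit ('-' :: rest) = [] :: pvMySplit rest := by
          simp [pvMySplit]
        rw [this]
        cases h : pvMySplit rest with
        | nil => exact absurd h (pvMySplit_ne_nil rest)
        | cons p ps => simp [pvConsHead]
      · have hpre : List.isPrefixOf ['-'] (c :: rest) = false := by
          simp [List.isPrefixOf]
          intro h; exact absurd h.symm hc
        simp only [hpre, Bool.false_eq_true, if_false, List.length_cons] at *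
        rw [ih _ _ _ (by omega)]
        have hms : pvMySplit (c :: rest)
            = match pvMySplit rest with
              | [] => [[c]]
              | p :: ps => (c :: p) :: ps := by
          simp [pvMySplit, hc]
        cases h : pvMySplit rest with
        | nil => exact absurd h (pvMySplit_ne_nil rest)
        | cons p ps =>
          rw [hms, h]
          simp [pvConsHead]

lemma pv_splitOn_eq_mySplit (s : List Char) :
    PySem.Chars.splitOn s ['-'] = pvMySplit s := by
  unfold PySem.Chars.splitOn
  rw [pv_go_spec _ _ _ _ (by omega)]
  cases h : pvMySplit s with
  | nil => exact absurd h (pvMySplit_ne_nil s)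
  | cons p ps => simp [pvConsHead]

lemma pvMySplit_of_index?_none (cs : List Char)
    (h : PySem.List.index? cs '-' = none) : pvMySplit cs = [cs] := by
  rw [PySem.List.index?_eq_none_iff] at h
  induction cs with
  | nil => simp [pvMySplit]
  | cons c rest ih =>
    have hc : c ≠ '-' := by intro hc; exact h (by simp [hc])
    have hrest : '-' ∉ rest := fun hr => h (by simp [hr])
    rw [show pvMySplit (c :: rest)
        = match pvMySplit rest with
          | [] => [[c]]
          | p :: ps => (c :: p) :: ps from by simp [pvMySplit, Ne.symm, hc]]
    rw [ih hrest]

lemma pvMySplit_of_index?_some (cs : List Char) (i : Nat)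
    (h : PySem.List.index? cs '-' = some i) :
    pvMySplit cs = cs.take i :: pvMySplit (cs.drop (i + 1)) := by
  induction cs generalizing i with
  | nil => simp [PySem.List.index?_eq_idxOf?] at h
  | cons c rest ih =>
    rw [PySem.List.index?_eq_idxOf?, List.idxOf?_cons] at h
    by_cases hc : c = '-'
    · subst hc
      simp only [beq_self_eq_true, if_true, Option.some.injEq] at h
      subst h
      simp [pvMySplit]
    · have hbc : (c == '-') = false := by simp [hc]
      simp only [hbc, Bool.false_eq_true, if_false, Option.map_eq_some_iff] at h
      obtain ⟨j, hj, hij⟩ := h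
      subst hij
      have := ih j (by rw [PySem.List.index?_eq_idxOf?]; exact hj)
      rw [show pvMySplit (c :: rest)
          = match pvMySplit rest with
            | [] => [[c]]
            | p :: ps => (c :: p) :: ps from by simp [pvMySplit, hc]]
      rw [this]
      simp

-- join of a nonempty list of nonempty parts is nonempty (any separator)
lemma pv_join_ne_nil (sep : List Char) (l : List (List Char))
    (hl : l ≠ []) (h : ∀ x ∈ l, x ≠ []) : PySem.Chars.join sep l ≠ [] := by
  cases l with
  | nil => exact absurd rfl hl
  | cons a t =>
    cases t with
    | nil =>
      simpa [PySem.Chars.join_singleton] using h a (by simp)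
    | cons b t' =>
      rw [PySem.Chars.join_cons_cons]
      intro hc
      simp only [List.append_eq_nil_iff] at hc
      exact h a (by simp) hc.1.1

-- join over a snoc
lemma pv_join_snoc (sep : List Char) (l : List (List Char)) (q : List Char) :
    PySem.Chars.join sep (l ++ [q]) =
      if l = [] then q else PySem.Chars.join sep l ++ sep ++ q := by
  induction l with
  | nil => simp [PySem.Chars.join_singleton]
  | cons a t ih =>
    cases t with
    | nil => simp [PySem.Chars.join_singleton, PySem.Chars.join_cons_cons]
    | cons b t' =>
      simp only [List.cons_append, PySem.Chars.join_cons_cons] at *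
      simp [ih, List.append_assoc]

-- main invariant for A's fold, from accumulators that are joins of all-nonempty part lists
lemma pv_fold_inv (segs : List (List Char))
    (hsegs : ∀ s ∈ segs, PySem.Chars.strip s ≠ [])
    (pl vl : List (List Char))
    (hpl : ∀ x ∈ pl, x ≠ []) (hvl : ∀ x ∈ vl, x ≠ []) :
    segs.foldl
      (fun (acc : List Char × List Char) segment =>
        match PySem.List.pyGet? segment 0 with
        | none => acc
        | some c =>
          if PySem.Chars.isdigit c then
            (acc.1, (if acc.2 ≠ [] then acc.2 ++ ['.'] else acc.2) ++ PySem.Chars.strip segment)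
          else
            ((if acc.1 ≠ [] then acc.1 ++ ['-'] else acc.1) ++ PySem.Chars.strip segment, acc.2))
      (PySem.Chars.join ['-'] pl, PySem.Chars.join ['.'] vl)
    = (PySem.Chars.join ['-'] (pl ++ (segs.filter (fun s => !pvHeadIsDigit s)).map PySem.Chars.strip),
       PySem.Chars.join ['.'] (vl ++ (segs.filter (fun s => pvHeadIsDigit s)).map PySem.Chars.strip)) := by
  induction segs generalizing pl vl with
  | nil => simp
  | cons seg rest ih =>
    have hstrip : PySem.Chars.strip seg ≠ [] := hsegs seg (by simp)
    have hseg : seg ≠ [] := by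
      intro h; rw [h] at hstrip; exact hstrip (by decide)
    obtain ⟨c, t, rfl⟩ : ∃ c t, seg = c :: t := by
      cases seg with
      | nil => exact absurd rfl hseg
      | cons c t => exact ⟨c, t, rfl⟩
    have hget : PySem.List.pyGet? (c :: t) 0 = some c := by
      simp [PySem.List.pyGet?, PySem.List.pyIdx?]
    have hhead : pvHeadIsDigit (c :: t) = PySem.Chars.isdigit c := by
      simp [pvHeadIsDigit]
    have hrest : ∀ s ∈ rest, PySem.Chars.strip s ≠ [] := fun s hs => hsegs s (by simp [hs])
    simp only [List.foldl_cons, hget]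
    by_cases hd : PySem.Chars.isdigit c = true
    · -- version branch
      have hjoin : (if PySem.Chars.join ['.'] vl ≠ [] then PySem.Chars.join ['.'] vl ++ ['.']
                     else PySem.Chars.join ['.'] vl) ++ PySem.Chars.strip (c :: t)
                   = PySem.Chars.join ['.'] (vl ++ [PySem.Chars.strip (c :: t)]) := by
        rw [pv_join_snoc]
        by_cases hvnil : vl = []
        · simp [hvnil, PySem.Chars.join_nil]
        · have := pv_join_ne_nil ['.'] vl hvnil hvl
          simp [hvnil, this, List.append_assoc]
      have hvl' : ∀ x ∈ vl ++ [PySem.Chars.strip (c :: t)], x ≠ [] := by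
        intro x hx
        rcases List.mem_append.mp hx with h | h
        · exact hvl x h
        · simp at h; subst h; exact hstrip
      simp only [hd, if_true, hjoin]
      rw [ih hrest pl (vl ++ [PySem.Chars.strip (c :: t)]) hpl hvl']
      simp [hhead, hd]
    · -- package branch
      have hjoin : (if PySem.Chars.join ['-'] pl ≠ [] then PySem.Chars.join ['-'] pl ++ ['-']
                     else PySem.Chars.join ['-'] pl) ++ PySem.Chars.strip (c :: t)
                   = PySem.Chars.join ['-'] (pl ++ [PySem.Chars.strip (c :: t)]) := by
        rw [pv_join_snoc]
        by_cases hpnil : pl = []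
        · simp [hpnil, PySem.Chars.join_nil]
        · have := pv_join_ne_nil ['-'] pl hpnil hpl
          simp [hpnil, this, List.append_assoc]
      have hpl' : ∀ x ∈ pl ++ [PySem.Chars.strip (c :: t)], x ≠ [] := by
        intro x hx
        rcases List.mem_append.mp hx with h | h
        · exact hpl x h
        · simp at h; subst h; exact hstrip
      simp only [hd, Bool.false_eq_true, if_false, hjoin]
      rw [ih hrest (pl ++ [PySem.Chars.strip (c :: t)]) vl hpl' hvl]
      simp [hhead, hd]

-- unfolding lemmas for pvAltGo
lemma pvAltGo_none (cs : List Char) (h : PySem.List.index? cs '-' = none) :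
    pvAltGo cs = (if pvHeadIsDigit cs then ([], PySem.Chars.strip cs)
                  else (PySem.Chars.strip cs, [])) := by
  rw [pvAltGo]
  split
  · rfl
  · rename_i i heq
    rw [h] at heq
    simp at heq

lemma pvAltGo_some (cs : List Char) (i : Nat) (h : PySem.List.index? cs '-' = some i) :
    pvAltGo cs =
      (let head := cs.take i
       let pv := pvAltGo (cs.drop (i + 1))
       let seg := PySem.Chars.strip head
       if pvHeadIsDigit head then
         (pv.1, if pv.2 = [] then seg else seg ++ ['.'] ++ pv.2)
       else
         ((if pv.1 = [] then seg else seg ++ ['-'] ++ pv.1), pv.2)) := by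
  rw [pvAltGo]
  split
  · rename_i heq
    rw [h] at heq
    simp at heq
  · rename_i j heq
    rw [h] at heq
    injection heq with hij
    subst hij
    rfl

-- B's recursion computes the same joins of the filtered stripped parts
lemma pvAltGo_spec (n : Nat) : ∀ (cs : List Char), cs.length ≤ n →
    (∀ s ∈ pvMySplit cs, PySem.Chars.strip s ≠ []) →
    pvAltGo cs
      = (PySem.Chars.join ['-'] (((pvMySplit cs).filter (fun s => !pvHeadIsDigit s)).map PySem.Chars.strip),
         PySem.Chars.join ['.'] (((pvMySplit cs).filter (fun s => pvHeadIsDigit s)).map PySem.Chars.strip)) := by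
  induction n with
  | zero =>
    intro cs hlen hparts
    have hcs : cs = [] := by cases cs <;> simp_all
    subst hcs
    exact absurd (by decide : PySem.Chars.strip ([] : List Char) = []) (hparts [] (by simp [pvMySplit]))
  | succ n ih =>
    intro cs hlen hparts
    cases hidx : PySem.List.index? cs '-' with
    | none =>
      rw [pvAltGo_none cs hidx, pvMySplit_of_index?_none cs hidx]
      cases hd : pvHeadIsDigit cs <;>
        simp [hd, PySem.Chars.join_singleton, PySem.Chars.join_nil]
    | some i =>
      have hsplit := pvMySplit_of_index?_some cs i hidx
      have hne : cs ≠ [] := by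
        intro h; subst h; simp [PySem.List.index?_eq_idxOf?] at hidx
      have hlen' : (cs.drop (i + 1)).length ≤ n := by
        have : 0 < cs.length := List.length_pos_iff.mpr hne
        simp only [List.length_drop]; omega
      have hparts' : ∀ s ∈ pvMySplit (cs.drop (i + 1)), PySem.Chars.strip s ≠ [] := by
        intro s hs; exact hparts s (by rw [hsplit]; exact List.mem_cons_of_mem _ hs)
      have hrec := ih (cs.drop (i + 1)) hlen' hparts'
      have hheadne : PySem.Chars.strip (cs.take i) ≠ [] :=
        hparts (cs.take i) (by rw [hsplit]; exact List.mem_cons_self)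
      have hrestne : ∀ x ∈ ((pvMySplit (cs.drop (i + 1))).filter (fun s => pvHeadIsDigit s)).map PySem.Chars.strip, x ≠ [] := by
        intro x hx
        obtain ⟨s, hs, rfl⟩ := List.mem_map.mp hx
        exact hparts' s (List.mem_filter.mp hs).1
      have hrestne' : ∀ x ∈ ((pvMySplit (cs.drop (i + 1))).filter (fun s => !pvHeadIsDigit s)).map PySem.Chars.strip, x ≠ [] := by
        intro x hx
        obtain ⟨s, hs, rfl⟩ := List.mem_map.mp hx
        exact hparts' s (List.mem_filter.mp hs).1
      rw [pvAltGo_some cs i hidx, hsplit]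
      simp only [hrec]
      cases hd : pvHeadIsDigit (cs.take i)
      · -- package branch
        simp only [hd, Bool.not_false, Bool.false_eq_true, if_false, List.filter_cons]
        cases hfl : ((pvMySplit (cs.drop (i + 1))).filter (fun s => !pvHeadIsDigit s)) with
        | nil => simp [PySem.Chars.join_nil, PySem.Chars.join_singleton]
        | cons p ps =>
          have hjn : PySem.Chars.join ['-'] ((p :: ps).map PySem.Chars.strip) ≠ [] := by
            apply pv_join_ne_nil _ _ (by simp)
            intro x hx
            apply hrestne' x; rw [hfl]; exact hx
          have hjn' : PySem.Chars.join ['-'] (PySem.Chars.strip p :: List.map PySem.Chars.strip ps) ≠ [] := by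
            simpa using hjn
          simp [hjn', PySem.Chars.join_cons_cons]
      · -- version branch
        simp only [hd, Bool.not_true, if_true, List.filter_cons]
        cases hfl : ((pvMySplit (cs.drop (i + 1))).filter (fun s => pvHeadIsDigit s)) with
        | nil => simp [PySem.Chars.join_nil, PySem.Chars.join_singleton]
        | cons p ps =>
          have hjn : PySem.Chars.join ['.'] ((p :: ps).map PySem.Chars.strip) ≠ [] := by
            apply pv_join_ne_nil _ _ (by simp)
            intro x hx
            apply hrestne x; rw [hfl]; exact hx
          have hjn' : PySem.Chars.join ['.'] (PySem.Chars.strip p :: List.map PySem.Chars.strip ps) ≠ [] := by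
            simpa using hjn
          simp [hjn', PySem.Chars.join_cons_cons]

-- ===== VERDICT (by name: the statement is the Claim_ definition above) =====
theorem process_compfile_line_spec : Claim_equal_process_compfile_line := by
  intro line _hdom hpre
  unfold Spec_process_compfile_line process_compfile_line process_compfile_line_alt
  have hA := pv_fold_inv (PySem.Chars.splitOn line.toList ['-']) hpre [] []
    (by simp) (by simp)
  simp only [PySem.Chars.join_nil, List.nil_append] at hA
  have hpre' : ∀ s ∈ pvMySplit line.toList, PySem.Chars.strip s ≠ [] := by
    intro s hs; exact hpre s (by rw [pv_splitOn_eq_mySplit]; exact hs)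
  have hB := pvAltGo_spec line.toList.length line.toList le_rfl hpre'
  rw [pv_splitOn_eq_mySplit] at hA
  rw [pv_splitOn_eq_mySplit]
  simp only [hA, hB]
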